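-- pv_equiv track=rewrite | github.com/Koroem/-3E1-Python-Condurat-Victor | Lab2.py | obstructed_seats
-- ===== SOURCE A (Python) =====
-- def obstructed_seats(matrix):
--     obstructed = []
--     for j in range(len(matrix[0])):
--         max_height = 0
--         for i in range(len(matrix)):
--             if matrix[i][j] > max_height:
--                 max_height = matrix[i][j]
--             else:
--                 obstructed.append((i, j))
--     return obstructed
-- ===== SOURCE B (Python) =====
-- def obstructed_seats(matrix):
--     rows = len(matrix)
--     cols = len(matrix[0])
--     front = [[0] * cols]
--     for i in range(1, rows):
--         prev = front[-1]
--         above = matrix[i - 1]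
--         front.append([max(prev[j], above[j]) for j in range(cols)])
--     return [(i, j) for j in range(cols) for i in range(rows)
--             if matrix[i][j] <= front[i][j]]
-- ===== Notes on version B (the rewrite author's own statement) =====
-- stated objective: alternative
-- what changed: A's single column-major scan carrying a running max per column is replaced by two passes: first build a front table front[i][j] = running max (floored at 0) of column j above row i, then collect seats with matrix[i][j] <= front[i][j] in column-major order.
import Mathlib
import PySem

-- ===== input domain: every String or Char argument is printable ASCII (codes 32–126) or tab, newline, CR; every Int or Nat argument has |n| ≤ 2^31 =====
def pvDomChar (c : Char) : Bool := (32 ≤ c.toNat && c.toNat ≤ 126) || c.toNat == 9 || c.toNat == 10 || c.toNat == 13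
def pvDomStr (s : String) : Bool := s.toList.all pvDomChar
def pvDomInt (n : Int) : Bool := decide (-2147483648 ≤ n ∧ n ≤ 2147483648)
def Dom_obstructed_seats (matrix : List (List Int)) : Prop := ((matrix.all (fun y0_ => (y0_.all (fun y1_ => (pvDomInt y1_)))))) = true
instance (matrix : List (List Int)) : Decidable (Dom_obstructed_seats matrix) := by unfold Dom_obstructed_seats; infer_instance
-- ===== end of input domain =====

-- B replaces A's single column-major scan carrying a running max with two passes:
-- a `front` table of running column maxima is built first, then a collection pass
-- reads it — objective: alternative decomposition (same cost).

-- ===== PORT A =====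
def obstructed_seats (matrix : List (List Int)) : List (Int × Int) :=
  (PySem.List.pyRange 0 ((PySem.List.pyGetD matrix 0 []).length : Int) 1).foldl
    (fun obstructed j =>
      ((PySem.List.pyRange 0 (matrix.length : Int) 1).foldl
        (fun (st : List (Int × Int) × Int) i =>
          if PySem.List.pyGetD (PySem.List.pyGetD matrix i []) j 0 > st.2
          then (st.1, PySem.List.pyGetD (PySem.List.pyGetD matrix i []) j 0)
          else (st.1 ++ [(i, j)], st.2))
        (obstructed, 0)).1)
    []

-- ===== PORT B =====
def obstructed_seats_alt (matrix : List (List Int)) : List (Int × Int) :=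
  let rows : Int := (matrix.length : Int)
  let cols : Int := ((PySem.List.pyGetD matrix 0 []).length : Int)
  let front := (PySem.List.pyRange 1 rows 1).foldl
    (fun front i =>
      front ++ [(PySem.List.pyRange 0 cols 1).map
        (fun j => max (PySem.List.pyGetD (PySem.List.pyGetD front (-1) []) j 0)
                      (PySem.List.pyGetD (PySem.List.pyGetD matrix (i - 1) []) j 0))])
    [List.replicate (PySem.List.pyGetD matrix 0 []).length 0]
  (PySem.List.pyRange 0 cols 1).flatMap
    (fun j => (PySem.List.pyRange 0 rows 1).filterMap
      (fun i => if PySem.List.pyGetD (PySem.List.pyGetD matrix i []) j 0 ≤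
                   PySem.List.pyGetD (PySem.List.pyGetD front i []) j 0
                then some (i, j) else none))

-- ===== PRECONDITION & SPEC =====
-- Pre_ excludes exactly the inputs on which the Python A raises IndexError: the empty
-- matrix (matrix[0]) and ragged matrices with a row shorter than the first row
-- (matrix[i][j]); the Python B raises IndexError on the same inputs.
def Pre_obstructed_seats (matrix : List (List Int)) : Prop :=
  matrix ≠ [] ∧ ∀ row ∈ matrix, (matrix.headI).length ≤ row.length
instance (matrix : List (List Int)) : Decidable (Pre_obstructed_seats matrix) := by
  unfold Pre_obstructed_seats; infer_instance

def pvWitness_obstructed_seats : List (List Int) := [[3, 1], [2, 4], [1, 5]]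

def Spec_obstructed_seats (matrix : List (List Int)) (out : List (Int × Int)) : Prop := out = obstructed_seats_alt matrix
instance (matrix : List (List Int)) (out : List (Int × Int)) : Decidable (Spec_obstructed_seats matrix out) := by unfold Spec_obstructed_seats; infer_instance

-- ===== CLAIM (what is proved, stated in full; the proofs are below) =====
def Claim_equal_obstructed_seats : Prop := ∀ (matrix : List (List Int)), Dom_obstructed_seats matrix → Pre_obstructed_seats matrix → Spec_obstructed_seats matrix (obstructed_seats matrix)

-- ===== LEMMAS AND PROOFS =====

-- matrix[i][j] as both ports read it (total, with pyGetD defaults)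
def pvVal (matrix : List (List Int)) (i j : Int) : Int :=
  PySem.List.pyGetD (PySem.List.pyGetD matrix i []) j 0

-- running maximum (floored at 0) of column j over rows strictly above row n
def pvPm (matrix : List (List Int)) (j : Int) : Nat → Int
  | 0 => 0
  | n + 1 => max (pvPm matrix j n) (pvVal matrix (n : Int) j)

-- the obstructed seats of column j among the first n rows
def pvObs (matrix : List (List Int)) (j : Int) : Nat → List (Int × Int)
  | 0 => []
  | n + 1 => pvObs matrix j n ++
      (if pvVal matrix (n : Int) j ≤ pvPm matrix j n then [((n : Int), j)] else [])

-- row i of B's front table, as a function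
def pvFrow (matrix : List (List Int)) (cols : Int) (i : Nat) : List Int :=
  (PySem.List.pyRange 0 cols 1).map (fun j => pvPm matrix j i)

theorem pv_innerA (matrix : List (List Int)) (j : Int) (n : Nat) (acc : List (Int × Int)) :
    (PySem.List.pyRange 0 (n : Int) 1).foldl
      (fun (st : List (Int × Int) × Int) i =>
        if PySem.List.pyGetD (PySem.List.pyGetD matrix i []) j 0 > st.2
        then (st.1, PySem.List.pyGetD (PySem.List.pyGetD matrix i []) j 0)
        else (st.1 ++ [(i, j)], st.2))
      (acc, 0) = (acc ++ pvObs matrix j n, pvPm matrix j n) := by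
  induction n with
  | zero =>
    simp [PySem.List.pyRange_one_eq_nil, pvObs, pvPm]
  | succ n ih =>
    have hcast : ((n + 1 : Nat) : Int) = (n : Int) + 1 := by push_cast; ring
    rw [hcast, PySem.List.pyRange_one_succ_right (Int.natCast_nonneg n), List.foldl_append, ih]
    simp only [List.foldl_cons, List.foldl_nil, pvObs, pvPm, pvVal]
    split_ifs with h1 h2 <;> simp_all [List.append_assoc] <;> omega

theorem pv_front (matrix : List (List Int)) (k : Nat) (hk : 1 ≤ k) :
    (PySem.List.pyRange 1 (k : Int) 1).foldl
      (fun front i =>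
        front ++ [(PySem.List.pyRange 0 ((PySem.List.pyGetD matrix 0 []).length : Int) 1).map
          (fun j => max (PySem.List.pyGetD (PySem.List.pyGetD front (-1) []) j 0)
                        (PySem.List.pyGetD (PySem.List.pyGetD matrix (i - 1) []) j 0))])
      [List.replicate (PySem.List.pyGetD matrix 0 []).length 0]
    = (List.range k).map (pvFrow matrix ((PySem.List.pyGetD matrix 0 []).length : Int)) := by
  induction k, hk using Nat.le_induction with
  | base =>
    rw [show ((1 : Nat) : Int) = 1 by norm_num, PySem.List.pyRange_one_eq_nil le_rfl]
    simp [pvFrow, pvPm, List.map_const', PySem.List.length_pyRange_one]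
  | succ k hk ih =>
    have hcast : ((k + 1 : Nat) : Int) = (k : Int) + 1 := by push_cast; ring
    rw [hcast, PySem.List.pyRange_one_succ_right (by exact_mod_cast hk), List.foldl_append, ih]
    simp only [List.foldl_cons, List.foldl_nil]
    have hne : (List.range k).map (pvFrow matrix ((PySem.List.pyGetD matrix 0 []).length : Int)) ≠ [] := by
      simp [List.range_eq_nil]; omega
    rw [PySem.List.pyGetD_neg_one (h := hne)]
    have hlast : ((List.range k).map (pvFrow matrix ((PySem.List.pyGetD matrix 0 []).length : Int))).getLast hne
        = pvFrow matrix ((PySem.List.pyGetD matrix 0 []).length : Int) (k - 1) := by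
      rw [List.getLast_eq_getElem]
      simp
    rw [hlast, show (k : Int) - 1 = ((k - 1 : Nat) : Int) by omega]
    have hrow : (PySem.List.pyRange 0 ((PySem.List.pyGetD matrix 0 []).length : Int) 1).map
        (fun j => max (PySem.List.pyGetD (pvFrow matrix ((PySem.List.pyGetD matrix 0 []).length : Int) (k - 1)) j 0)
                      (PySem.List.pyGetD (PySem.List.pyGetD matrix ((k - 1 : Nat) : Int) []) j 0))
        = pvFrow matrix ((PySem.List.pyGetD matrix 0 []).length : Int) k := by
      conv_rhs => rw [show k = (k - 1) + 1 by omega]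
      unfold pvFrow
      refine List.map_congr_left ?_
      intro j hj
      rw [PySem.List.mem_pyRange_one] at hj
      rw [PySem.List.pyGetD_map_pyRange_of_nonneg _ _ _ _ hj.1 hj.2]
      simp [pvPm, pvVal]
    rw [hrow, List.range_succ, List.map_append, List.map_singleton]

theorem pv_colB (matrix : List (List Int)) (j : Int) (hj0 : 0 ≤ j)
    (hj : j < ((PySem.List.pyGetD matrix 0 []).length : Int)) (n : Nat) (hn : n ≤ matrix.length) :
    (PySem.List.pyRange 0 (n : Int) 1).filterMap
      (fun i => if PySem.List.pyGetD (PySem.List.pyGetD matrix i []) j 0 ≤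
                   PySem.List.pyGetD (PySem.List.pyGetD
                     ((List.range matrix.length).map
                       (pvFrow matrix ((PySem.List.pyGetD matrix 0 []).length : Int))) i []) j 0
                then some (i, j) else none)
    = pvObs matrix j n := by
  induction n with
  | zero =>
    simp [PySem.List.pyRange_one_eq_nil, pvObs]
  | succ n ih =>
    have hlt : n < matrix.length := hn
    have hcast : ((n + 1 : Nat) : Int) = (n : Int) + 1 := by push_cast; ring
    rw [hcast, PySem.List.pyRange_one_succ_right (Int.natCast_nonneg n), List.filterMap_append,
      ih (Nat.le_of_succ_le hn)]
    simp only [pvObs]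
    congr 1
    have hfr : PySem.List.pyGetD ((List.range matrix.length).map
        (pvFrow matrix ((PySem.List.pyGetD matrix 0 []).length : Int))) ((n : Nat) : Int) []
        = pvFrow matrix ((PySem.List.pyGetD matrix 0 []).length : Int) n := by
      rw [PySem.List.pyGetD_natCast]
      simp [List.getD_eq_getElem?_getD, hlt]
    have hcol : PySem.List.pyGetD (pvFrow matrix ((PySem.List.pyGetD matrix 0 []).length : Int) n) j 0
        = pvPm matrix j n := by
      simp only [pvFrow]
      rw [PySem.List.pyGetD_map_pyRange_of_nonneg _ _ _ _ hj0 hj]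
    simp only [List.filterMap_cons, List.filterMap_nil]
    rw [hfr, hcol]
    simp only [pvVal]
    split_ifs <;> simp

theorem pv_outer (matrix : List (List Int)) (c : Nat)
    (hc : c ≤ (PySem.List.pyGetD matrix 0 []).length) (acc : List (Int × Int)) :
    (PySem.List.pyRange 0 (c : Int) 1).foldl
      (fun obstructed j =>
        ((PySem.List.pyRange 0 (matrix.length : Int) 1).foldl
          (fun (st : List (Int × Int) × Int) i =>
            if PySem.List.pyGetD (PySem.List.pyGetD matrix i []) j 0 > st.2
            then (st.1, PySem.List.pyGetD (PySem.List.pyGetD matrix i []) j 0)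
            else (st.1 ++ [(i, j)], st.2))
          (obstructed, 0)).1)
      acc
    = acc ++ (PySem.List.pyRange 0 (c : Int) 1).flatMap
        (fun j => (PySem.List.pyRange 0 (matrix.length : Int) 1).filterMap
          (fun i => if PySem.List.pyGetD (PySem.List.pyGetD matrix i []) j 0 ≤
                       PySem.List.pyGetD (PySem.List.pyGetD
                         ((List.range matrix.length).map
                           (pvFrow matrix ((PySem.List.pyGetD matrix 0 []).length : Int))) i []) j 0
                    then some (i, j) else none)) := by
  induction c with
  | zero =>
    simp [PySem.List.pyRange_one_eq_nil]
  | succ c ih =>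
    have hcast : ((c + 1 : Nat) : Int) = (c : Int) + 1 := by push_cast; ring
    rw [hcast, PySem.List.pyRange_one_succ_right (Int.natCast_nonneg c), List.foldl_append,
      List.flatMap_append, ih (Nat.le_of_succ_le hc)]
    simp only [List.foldl_cons, List.foldl_nil, List.flatMap_cons, List.flatMap_nil]
    rw [pv_innerA matrix ((c : Nat) : Int) matrix.length]
    rw [pv_colB matrix ((c : Nat) : Int) (Int.natCast_nonneg c) (by exact_mod_cast hc) matrix.length le_rfl]
    simp [List.append_assoc]

-- ===== VERDICT (by name: the statement is the Claim_ definition above) =====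
theorem obstructed_seats_spec : Claim_equal_obstructed_seats := by
  intro matrix _ hpre
  unfold Spec_obstructed_seats
  obtain ⟨hne, -⟩ := hpre
  have hrows : 1 ≤ matrix.length := List.length_pos_of_ne_nil hne
  simp only [obstructed_seats, obstructed_seats_alt]
  rw [pv_front matrix matrix.length hrows,
    pv_outer matrix (PySem.List.pyGetD matrix 0 []).length le_rfl []]
  simp
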